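-- pv_equiv track=rewrite | github.com/davipatti/aoc2024 | day-12/main.py | n_corners
-- ===== SOURCE A (Python) =====
-- masks = [
--     [(-1, 0), (-1, 1), (0, 1)],
--     [(0, 1), (1, 1), (1, 0)],
--     [(1, 0), (1, -1), (0, -1)],
--     [(0, -1), (-1, -1), (-1, 0)],
-- ]
--
-- def n_corners(patch):
--     """
--     Number of corners == number of edges for any patch.
--
--     Consider corners:
--
--         ...
--         .##
--         .##
--
--     Call positions left, above and above left of the corner a, b, and x:
--
--         xb.
--         a##
--         .##
--
--     Corners are characterised by x being absent (i.e. not in the patch) and a and b both being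
--     absent (for outer corners) or and and b both being present (for inner corners).
--
--     There's another case that the problem flags specifically:
--
--         ####
--         ##.#
--         #.##
--         ####
--
--     Here there is a single # patch that touches itself diagonally in the center. This bucks
--     one of the rules above. So, x can be in the patch if a and b are both not in the patch.
--
--     Finally, obviously corners could be any rotation, so there are 4 different sets of a, x and b.
--     """
--     n = 0
--     for i, j in patch:
--         for (a_i, a_j), (x_i, x_j), (b_i, b_j) in masks:
--
--             # x element must be absent
--             x_absent = not (i + x_i, j + x_j) in patch
--
--             # a and b elements must either both be absent or both be present
--             # i.e. they must match
--             a_present = (i + a_i, j + a_j) in patch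
--             b_present = (i + b_i, j + b_j) in patch
--             a_matches_b = a_present is b_present
--
--             if x_absent and a_matches_b:
--                 n += 1
--
--             elif not x_absent and not a_present and not b_present:
--                 n += 1
--
--     return n
-- ===== SOURCE B (Python) =====
-- def n_corners(patch):
--     """Count corners by staging over lattice VERTICES instead of cells: collect
--     the corner points of every cell, then for each vertex look at the 2x2 block
--     of cells around it.  A vertex is a corner of the region iff 1 or 3 of those
--     cells are present (one corner) or exactly the two diagonal cells are
--     present (two touching corners)."""
--     cells = set(patch)
--     vertices = {(i + a, j + b) for i, j in cells for a in (0, 1) for b in (0, 1)}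
--     total = 0
--     for u, v in vertices:
--         block = [(u - 1 + a, v - 1 + b) in cells for a in (0, 1) for b in (0, 1)]
--         k = sum(block)
--         if k == 1 or k == 3:
--             total += 1
--         elif k == 2 and block[0] == block[3]:
--             total += 2
--     return total
-- ===== Notes on version B (the rewrite author's own statement) =====
-- stated objective: alternative
-- what changed: A makes one pass over the cells testing, per cell, the 4 (a,x,b) corner masks; B uses a different algorithm: it collects the set of all corner lattice points of the cells and grades each vertex once by how many of the 4 cells of its 2x2 block are present (1 or 3 present = one corner, exactly the diagonal pair = two corners).
import Mathlib
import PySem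

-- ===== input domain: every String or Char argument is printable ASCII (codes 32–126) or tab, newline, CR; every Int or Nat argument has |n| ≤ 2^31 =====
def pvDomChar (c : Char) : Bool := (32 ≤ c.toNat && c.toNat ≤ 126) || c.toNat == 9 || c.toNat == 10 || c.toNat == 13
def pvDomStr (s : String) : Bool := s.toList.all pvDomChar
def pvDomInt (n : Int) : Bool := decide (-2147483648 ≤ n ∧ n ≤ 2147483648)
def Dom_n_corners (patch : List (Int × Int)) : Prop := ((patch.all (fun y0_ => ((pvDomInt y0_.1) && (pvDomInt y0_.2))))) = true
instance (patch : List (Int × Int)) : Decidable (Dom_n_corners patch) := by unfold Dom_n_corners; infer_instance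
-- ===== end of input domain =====

-- B counts corners by a staged vertex pass (collect the corner points of all cells, then grade
-- each vertex by its 2x2 block of cells) instead of A's per-cell (a,x,b) masks; equivalence is
-- proved on duplicate-free patches.

-- ===== PORT A =====
def pvMasks : List ((Int × Int) × (Int × Int) × (Int × Int)) :=
  [((-1, 0), (-1, 1), (0, 1)),
   ((0, 1), (1, 1), (1, 0)),
   ((1, 0), (1, -1), (0, -1)),
   ((0, -1), (-1, -1), (-1, 0))]

def n_corners (patch : List (Int × Int)) : Int :=
  patch.foldl (fun n c =>
    pvMasks.foldl (fun n m =>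
      let a := m.1
      let x := m.2.1
      let b := m.2.2
      let xAbsent := !decide ((c.1 + x.1, c.2 + x.2) ∈ patch)
      let aPresent := decide ((c.1 + a.1, c.2 + a.2) ∈ patch)
      let bPresent := decide ((c.1 + b.1, c.2 + b.2) ∈ patch)
      if xAbsent && (aPresent == bPresent) then n + 1
      else if !xAbsent && !aPresent && !bPresent then n + 1
      else n) n) 0

-- ===== PORT B =====
-- the four corner points of one cell (the comprehension's (a, b) pairs in order)
def pvCellCorners (c : Int × Int) : List (Int × Int) :=
  [(c.1, c.2), (c.1, c.2 + 1), (c.1 + 1, c.2), (c.1 + 1, c.2 + 1)]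

def n_corners_alt (patch : List (Int × Int)) : Int :=
  let cells : PySem.Set (Int × Int) := PySem.Set.ofList patch
  let vertices : PySem.Set (Int × Int) := PySem.Set.ofList (cells.flatMap pvCellCorners)
  -- iteration over the set 'vertices' only feeds an order-independent sum
  vertices.foldl (fun total w =>
    let b0 := decide ((w.1 - 1, w.2 - 1) ∈ cells)
    let b1 := decide ((w.1 - 1, w.2) ∈ cells)
    let b2 := decide ((w.1, w.2 - 1) ∈ cells)
    let b3 := decide ((w.1, w.2) ∈ cells)
    let k : Int := (if b0 then 1 else 0) + (if b1 then 1 else 0)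
                 + (if b2 then 1 else 0) + (if b3 then 1 else 0)
    if k = 1 ∨ k = 3 then total + 1
    else if k = 2 ∧ b0 = b3 then total + 2
    else total) 0

-- ===== PRECONDITION & SPEC =====
-- Pre_ states the set invariant of the patch argument (Python type set[tuple[int,int]]; its list
-- encoding holds distinct cells): on duplicate-carrying lists A recounts each duplicate entry
-- while B's staged set pass does not, so the counts need not agree.
def Pre_n_corners (patch : List (Int × Int)) : Prop := patch.Nodup
instance (patch : List (Int × Int)) : Decidable (Pre_n_corners patch) := by unfold Pre_n_corners; infer_instance
def pvWitness_n_corners : (List (Int × Int)) := [(0, 0), (0, 1), (1, 1)]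

def Spec_n_corners (patch : List (Int × Int)) (out : Int) : Prop := out = n_corners_alt patch
instance (patch : List (Int × Int)) (out : Int) : Decidable (Spec_n_corners patch out) := by unfold Spec_n_corners; infer_instance

-- ===== CLAIM (what is proved, stated in full; the proofs are below) =====
def Claim_equal_n_corners : Prop := ∀ (patch : List (Int × Int)), Dom_n_corners patch → Pre_n_corners patch → Spec_n_corners patch (n_corners patch)

-- ===== LEMMAS AND PROOFS =====

-- corner indicator of one (a, x, b) mask, as a function of the three membership facts
def mF (a x b : Prop) [Decidable a] [Decidable x] [Decidable b] : Int :=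
  if (¬x ∧ (a ↔ b)) ∨ (x ∧ ¬a ∧ ¬b) then 1 else 0

-- the four per-mask cell indicators (points written in normal form)
def F0 (L : List (Int × Int)) (c : Int × Int) : Int :=
  mF ((c.1 - 1, c.2) ∈ L) ((c.1 - 1, c.2 + 1) ∈ L) ((c.1, c.2 + 1) ∈ L)
def F1 (L : List (Int × Int)) (c : Int × Int) : Int :=
  mF ((c.1, c.2 + 1) ∈ L) ((c.1 + 1, c.2 + 1) ∈ L) ((c.1 + 1, c.2) ∈ L)
def F2 (L : List (Int × Int)) (c : Int × Int) : Int :=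
  mF ((c.1 + 1, c.2) ∈ L) ((c.1 + 1, c.2 - 1) ∈ L) ((c.1, c.2 - 1) ∈ L)
def F3 (L : List (Int × Int)) (c : Int × Int) : Int :=
  mF ((c.1, c.2 - 1) ∈ L) ((c.1 - 1, c.2 - 1) ∈ L) ((c.1 - 1, c.2) ∈ L)

def tA (L : List (Int × Int)) (c : Int × Int) : Int :=
  F0 L c + F1 L c + F2 L c + F3 L c

-- per-vertex contribution of B's fold, memberships taken in the raw list
def gV (L : List (Int × Int)) (w : Int × Int) : Int :=
  let b0 := decide ((w.1 - 1, w.2 - 1) ∈ L)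
  let b1 := decide ((w.1 - 1, w.2) ∈ L)
  let b2 := decide ((w.1, w.2 - 1) ∈ L)
  let b3 := decide ((w.1, w.2) ∈ L)
  let k : Int := (if b0 then 1 else 0) + (if b1 then 1 else 0)
               + (if b2 then 1 else 0) + (if b3 then 1 else 0)
  if k = 1 ∨ k = 3 then 1
  else if k = 2 ∧ b0 = b3 then 2
  else 0

lemma maskStep (L : List (Int × Int)) (n : Int) (pa px pb : Int × Int) :
    (if (!decide (px ∈ L)) && (decide (pa ∈ L) == decide (pb ∈ L)) then n + 1
     else if (!(!decide (px ∈ L))) && (!decide (pa ∈ L)) && (!decide (pb ∈ L)) then n + 1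
     else n)
    = n + mF (pa ∈ L) (px ∈ L) (pb ∈ L) := by
  by_cases h1 : pa ∈ L <;> by_cases h2 : px ∈ L <;> by_cases h3 : pb ∈ L <;>
    simp [mF, h1, h2, h3]

lemma cellA (L : List (Int × Int)) (n : Int) (c : Int × Int) :
    (pvMasks.foldl (fun n m =>
      let a := m.1
      let x := m.2.1
      let b := m.2.2
      let xAbsent := !decide ((c.1 + x.1, c.2 + x.2) ∈ L)
      let aPresent := decide ((c.1 + a.1, c.2 + a.2) ∈ L)
      let bPresent := decide ((c.1 + b.1, c.2 + b.2) ∈ L)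
      if xAbsent && (aPresent == bPresent) then n + 1
      else if !xAbsent && !aPresent && !bPresent then n + 1
      else n) n)
    = n + tA L c := by
  simp only [pvMasks, List.foldl_cons, List.foldl_nil]
  rw [maskStep, maskStep, maskStep, maskStep]
  have e1 : ((c.1 + -1, c.2 + 0) : Int × Int) = (c.1 - 1, c.2) := by
    rw [Prod.mk.injEq]; exact ⟨by ring, by ring⟩
  have e2 : ((c.1 + -1, c.2 + 1) : Int × Int) = (c.1 - 1, c.2 + 1) := by
    rw [Prod.mk.injEq]; exact ⟨by ring, by ring⟩
  have e3 : ((c.1 + 0, c.2 + 1) : Int × Int) = (c.1, c.2 + 1) := by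
    apply Prod.ext <;> simp
  have e5 : ((c.1 + 1, c.2 + 0) : Int × Int) = (c.1 + 1, c.2) := by
    apply Prod.ext <;> simp
  have e6 : ((c.1 + 1, c.2 + -1) : Int × Int) = (c.1 + 1, c.2 - 1) := by
    rw [Prod.mk.injEq]; exact ⟨by ring, by ring⟩
  have e7 : ((c.1 + 0, c.2 + -1) : Int × Int) = (c.1, c.2 - 1) := by
    rw [Prod.mk.injEq]; exact ⟨by ring, by ring⟩
  have e8 : ((c.1 + -1, c.2 + -1) : Int × Int) = (c.1 - 1, c.2 - 1) := by
    rw [Prod.mk.injEq]; exact ⟨by ring, by ring⟩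
  simp only [e1, e2, e3, e5, e6, e7, e8]
  simp only [tA, F0, F1, F2, F3]
  ring

lemma gStep (L : List (Int × Int)) (total : Int) (w : Int × Int) :
    (let b0 := decide ((w.1 - 1, w.2 - 1) ∈ L)
     let b1 := decide ((w.1 - 1, w.2) ∈ L)
     let b2 := decide ((w.1, w.2 - 1) ∈ L)
     let b3 := decide ((w.1, w.2) ∈ L)
     let k : Int := (if b0 then 1 else 0) + (if b1 then 1 else 0)
                  + (if b2 then 1 else 0) + (if b3 then 1 else 0)
     if k = 1 ∨ k = 3 then total + 1
     else if k = 2 ∧ b0 = b3 then total + 2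
     else total)
    = total + gV L w := by
  simp only [gV]
  split_ifs <;> ring

-- B's per-vertex grade splits into the four mask indicators of the cells around the vertex
lemma gV_decomp (L : List (Int × Int)) (v : Int × Int) :
    gV L v
    = (if ((v.1, v.2 - 1) : Int × Int) ∈ L then F0 L (v.1, v.2 - 1) else 0)
    + (if ((v.1 - 1, v.2 - 1) : Int × Int) ∈ L then F1 L (v.1 - 1, v.2 - 1) else 0)
    + (if ((v.1 - 1, v.2) : Int × Int) ∈ L then F2 L (v.1 - 1, v.2) else 0)
    + (if ((v.1, v.2) : Int × Int) ∈ L then F3 L (v.1, v.2) else 0) := by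
  have h1 : (v.2 : Int) - 1 + 1 = v.2 := by ring
  have h2 : (v.1 : Int) - 1 + 1 = v.1 := by ring
  simp only [gV, F0, F1, F2, F3, mF, h1, h2]
  by_cases p00 : ((v.1 - 1, v.2 - 1) : Int × Int) ∈ L <;>
    by_cases p01 : ((v.1 - 1, v.2) : Int × Int) ∈ L <;>
      by_cases p10 : ((v.1, v.2 - 1) : Int × Int) ∈ L <;>
        by_cases p11 : ((v.1, v.2) : Int × Int) ∈ L <;>
          simp [p00, p01, p10, p11]

lemma foldl_step_eq (l : List (Int × Int)) (f : Int → Int × Int → Int) (g : Int × Int → Int)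
    (a : Int) (h : ∀ n c, f n c = n + g c) : l.foldl f a = a + (l.map g).sum := by
  induction l generalizing a with
  | nil => simp
  | cons b t ih =>
    rw [List.foldl_cons, ih, h, List.map_cons, List.sum_cons]; ring

lemma sum_map_add (l : List (Int × Int)) (f g : Int × Int → Int) :
    (l.map (fun x => f x + g x)).sum = (l.map f).sum + (l.map g).sum := by
  induction l with
  | nil => simp
  | cons a t ih => simp only [List.map_cons, List.sum_cons, ih]; ring

-- regrouping: summing 'if σ v ∈ L then F (σ v) else 0' over a vertex list covering τ '' L
-- equals summing F over L (σ injective, τ its one-sided inverse)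
lemma regroup (L V : List (Int × Int)) (hL : L.Nodup) (hV : V.Nodup)
    (σ τ : Int × Int → Int × Int)
    (hτσ : ∀ c, σ (τ c) = c)
    (hinj : ∀ v w, σ v = σ w → v = w)
    (hcov : ∀ c ∈ L, τ c ∈ V) (F : Int × Int → Int) :
    (V.map (fun v => if σ v ∈ L then F (σ v) else 0)).sum = (L.map F).sum := by
  rw [← List.sum_toFinset _ hV, ← List.sum_toFinset _ hL]
  rw [← Finset.sum_filter]
  apply Finset.sum_nbij' (i := fun v => σ v) (j := fun c => τ c)
  · intro a ha
    rw [Finset.mem_filter] at ha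
    exact List.mem_toFinset.mpr ha.2
  · intro b hb
    rw [Finset.mem_filter, List.mem_toFinset]
    have hbL := List.mem_toFinset.mp hb
    refine ⟨hcov b hbL, ?_⟩
    rw [hτσ]; exact hbL
  · intro a _
    apply hinj
    rw [hτσ]
  · intro b _
    exact hτσ b
  · intro a _
    rfl

lemma mainEq (patch : List (Int × Int)) (hnd : patch.Nodup) :
    n_corners patch = n_corners_alt patch := by
  -- A side
  have hA : n_corners patch = 0 + (patch.map (tA patch)).sum := by
    unfold n_corners
    exact foldl_step_eq patch _ (tA patch) 0 (fun n c => cellA patch n c)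
  -- B side
  have hself : PySem.Set.ofList patch = patch := PySem.Set.ofList_eq_self_of_nodup patch hnd
  set V : List (Int × Int) := PySem.Set.ofList (patch.flatMap pvCellCorners) with hVdef
  have hVnd : V.Nodup := PySem.Set.nodup_ofList _
  have hB : n_corners_alt patch = 0 + (V.map (gV patch)).sum := by
    unfold n_corners_alt
    rw [hself]
    exact foldl_step_eq V _ (gV patch) 0 (fun n w => gStep patch n w)
  have hcov : ∀ (d : Int × Int), ∀ c ∈ patch, ((c.1 + d.1, c.2 + d.2) : Int × Int) ∈ patch.flatMap pvCellCorners → ((c.1 + d.1, c.2 + d.2) : Int × Int) ∈ V := by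
    intro d c _ h
    exact (PySem.Set.mem_ofList _ _).mpr h
  -- the four regrouped sums
  have r0 : (V.map (fun v => if ((v.1, v.2 - 1) : Int × Int) ∈ patch then F0 patch (v.1, v.2 - 1) else 0)).sum = (patch.map (F0 patch)).sum := by
    apply regroup patch V hnd hVnd (fun v => (v.1, v.2 - 1)) (fun c => (c.1, c.2 + 1))
    · intro c; rw [Prod.mk.injEq]; exact ⟨by ring, by ring⟩
    · intro v w h
      rw [Prod.mk.injEq] at h
      exact Prod.ext h.1 (by omega)
    · intro c hc
      refine (PySem.Set.mem_ofList _ _).mpr ?_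
      rw [List.mem_flatMap]
      exact ⟨c, hc, by simp [pvCellCorners]⟩
  have r1 : (V.map (fun v => if ((v.1 - 1, v.2 - 1) : Int × Int) ∈ patch then F1 patch (v.1 - 1, v.2 - 1) else 0)).sum = (patch.map (F1 patch)).sum := by
    apply regroup patch V hnd hVnd (fun v => (v.1 - 1, v.2 - 1)) (fun c => (c.1 + 1, c.2 + 1))
    · intro c; rw [Prod.mk.injEq]; exact ⟨by ring, by ring⟩
    · intro v w h
      rw [Prod.mk.injEq] at h
      exact Prod.ext (by omega) (by omega)
    · intro c hc
      refine (PySem.Set.mem_ofList _ _).mpr ?_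
      rw [List.mem_flatMap]
      exact ⟨c, hc, by simp [pvCellCorners]⟩
  have r2 : (V.map (fun v => if ((v.1 - 1, v.2) : Int × Int) ∈ patch then F2 patch (v.1 - 1, v.2) else 0)).sum = (patch.map (F2 patch)).sum := by
    apply regroup patch V hnd hVnd (fun v => (v.1 - 1, v.2)) (fun c => (c.1 + 1, c.2))
    · intro c; rw [Prod.mk.injEq]; exact ⟨by ring, by ring⟩
    · intro v w h
      rw [Prod.mk.injEq] at h
      exact Prod.ext (by omega) h.2
    · intro c hc
      refine (PySem.Set.mem_ofList _ _).mpr ?_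
      rw [List.mem_flatMap]
      exact ⟨c, hc, by simp [pvCellCorners]⟩
  have r3 : (V.map (fun v => if ((v.1, v.2) : Int × Int) ∈ patch then F3 patch (v.1, v.2) else 0)).sum = (patch.map (F3 patch)).sum := by
    apply regroup patch V hnd hVnd (fun v => (v.1, v.2)) (fun c => (c.1, c.2))
    · intro c; rfl
    · intro v w h
      rw [Prod.mk.injEq] at h
      exact Prod.ext h.1 h.2
    · intro c hc
      refine (PySem.Set.mem_ofList _ _).mpr ?_
      rw [List.mem_flatMap]
      exact ⟨c, hc, by simp [pvCellCorners]⟩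
  -- combine
  have hsplit : (V.map (gV patch)).sum
      = (V.map (fun v => if ((v.1, v.2 - 1) : Int × Int) ∈ patch then F0 patch (v.1, v.2 - 1) else 0)).sum
      + (V.map (fun v => if ((v.1 - 1, v.2 - 1) : Int × Int) ∈ patch then F1 patch (v.1 - 1, v.2 - 1) else 0)).sum
      + (V.map (fun v => if ((v.1 - 1, v.2) : Int × Int) ∈ patch then F2 patch (v.1 - 1, v.2) else 0)).sum
      + (V.map (fun v => if ((v.1, v.2) : Int × Int) ∈ patch then F3 patch (v.1, v.2) else 0)).sum := by
    have hfun : gV patch = fun v =>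
        (fun v => (fun v => (if ((v.1, v.2 - 1) : Int × Int) ∈ patch then F0 patch (v.1, v.2 - 1) else 0)
          + (if ((v.1 - 1, v.2 - 1) : Int × Int) ∈ patch then F1 patch (v.1 - 1, v.2 - 1) else 0)) v
          + (if ((v.1 - 1, v.2) : Int × Int) ∈ patch then F2 patch (v.1 - 1, v.2) else 0)) v
          + (if ((v.1, v.2) : Int × Int) ∈ patch then F3 patch (v.1, v.2) else 0) := by
      funext v; rw [gV_decomp]
    rw [hfun, sum_map_add, sum_map_add, sum_map_add]
  have hsplitA : (patch.map (tA patch)).sum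
      = (patch.map (F0 patch)).sum + (patch.map (F1 patch)).sum
      + (patch.map (F2 patch)).sum + (patch.map (F3 patch)).sum := by
    have hfun : tA patch = fun c =>
        (fun c => (fun c => F0 patch c + F1 patch c) c + F2 patch c) c + F3 patch c := rfl
    rw [hfun, sum_map_add, sum_map_add, sum_map_add]
  rw [hA, hB, hsplit, hsplitA, r0, r1, r2, r3]

-- ===== VERDICT (by name: the statement is the Claim_ definition above) =====
theorem n_corners_spec : Claim_equal_n_corners := by
  intro patch _ hpre
  unfold Spec_n_corners
  exact mainEq patch hpre
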